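-- pv_equiv track=rewrite | github.com/Milkpainter/tennis-predictor-101 | features/advanced_momentum_system.py | _calculate_current_streak
-- ===== SOURCE A (Python) =====
-- from typing import Dict, Any, List, Optional, Tuple
--
-- def _calculate_current_streak(sequence: List[bool]) -> int:
--     """Calculate current streak from boolean sequence."""
--     if not sequence:
--         return 0
--
--     streak = 0
--     for result in reversed(sequence):
--         if result:
--             streak += 1
--         else:
--             break
--     return streak
-- ===== SOURCE B (Python) =====
-- def _calculate_current_streak(sequence):
--     """Single forward pass: a False resets the counter, so the final value
--     is the length of the trailing True-run."""
--     streak = 0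
--     for result in sequence:
--         streak = streak + 1 if result else 0
--     return streak
-- ===== Notes on version B (the rewrite author's own statement) =====
-- stated objective: alternative
-- what changed: Replaces the reversed-iteration loop with early break by a single forward pass that resets an accumulator to 0 on each False, so the surviving count is the trailing True-run length.
import Mathlib
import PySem

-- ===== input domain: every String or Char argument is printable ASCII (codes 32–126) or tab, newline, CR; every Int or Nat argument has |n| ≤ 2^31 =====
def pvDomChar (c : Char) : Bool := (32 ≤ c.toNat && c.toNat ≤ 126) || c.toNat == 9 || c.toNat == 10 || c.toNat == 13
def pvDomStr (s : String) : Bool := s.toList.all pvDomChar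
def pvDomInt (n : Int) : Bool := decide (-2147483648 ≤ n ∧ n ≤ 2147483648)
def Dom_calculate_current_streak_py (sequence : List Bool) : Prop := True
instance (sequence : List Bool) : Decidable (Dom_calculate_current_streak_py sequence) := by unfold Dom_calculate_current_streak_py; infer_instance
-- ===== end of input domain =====

-- B replaces A's reversed loop with break by a forward pass resetting the counter on False; same return value, no speed claim.
-- ===== PORT A =====
-- loop 'for result in reversed(sequence): if result: streak += 1 else: break'
def pvLoopA : List Bool → Int → Int
  | [], streak => streak
  | r :: rest, streak => if r then pvLoopA rest (streak + 1) else streak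

def calculate_current_streak_py (sequence : List Bool) : Int :=
  if sequence = [] then 0
  else pvLoopA sequence.reverse 0

-- ===== PORT B =====
def calculate_current_streak_py_alt (sequence : List Bool) : Int :=
  sequence.foldl (fun streak result => if result then streak + 1 else 0) 0

-- ===== PRECONDITION & SPEC =====
def Spec_calculate_current_streak_py (sequence : List Bool) (out : Int) : Prop := out = calculate_current_streak_py_alt sequence
instance (sequence : List Bool) (out : Int) : Decidable (Spec_calculate_current_streak_py sequence out) := by unfold Spec_calculate_current_streak_py; infer_instance

-- ===== CLAIM (what is proved, stated in full; the proofs are below) =====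
def Claim_equal_calculate_current_streak_py : Prop := ∀ (sequence : List Bool), Dom_calculate_current_streak_py sequence → Spec_calculate_current_streak_py sequence (calculate_current_streak_py sequence)

-- ===== LEMMAS AND PROOFS =====

-- ===== VERDICT (by name: the statement is the Claim_ definition above) =====
theorem pvLoopA_shift (l : List Bool) (s : Int) : pvLoopA l s = pvLoopA l 0 + s := by
  induction l generalizing s with
  | nil => simp [pvLoopA]
  | cons r rest ih =>
    simp only [pvLoopA]
    by_cases hr : r
    · simp [hr]; rw [ih (s+1), ih 1]; ring
    · simp [hr]

theorem pvAlt_eq_loop (l : List Bool) :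
    calculate_current_streak_py_alt l = pvLoopA l.reverse 0 := by
  induction l using List.reverseRecOn with
  | nil => simp [calculate_current_streak_py_alt, pvLoopA]
  | append_singleton l b ih =>
    simp only [calculate_current_streak_py_alt, List.foldl_append, List.foldl_cons,
      List.foldl_nil, List.reverse_append, List.reverse_cons, List.reverse_nil,
      List.nil_append, List.singleton_append, pvLoopA]
    by_cases hb : b
    · simp only [hb, if_true]
      rw [pvLoopA_shift l.reverse (0 + 1), ← ih]
      simp [calculate_current_streak_py_alt]
    · simp [hb]

theorem calculate_current_streak_py_spec : Claim_equal_calculate_current_streak_py := by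
  intro sequence _
  unfold Spec_calculate_current_streak_py calculate_current_streak_py
  rw [pvAlt_eq_loop]
  by_cases h : sequence = []
  · simp [h, pvLoopA]
  · simp [h]
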